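-- pv_equiv track=rewrite | github.com/jasonmci/football | tools/enhanced_demo.py | _determine_play_category
-- ===== SOURCE A (Python) =====
-- def _determine_play_category(offense_data) -> str:
--     """Determine play category for outcome table lookup"""
--     name = offense_data.get("name", "").lower()
--     description = offense_data.get("description", "").lower()
--     execution = offense_data.get("execution_notes", "").lower()
--     play_type = offense_data.get("play_type", "").lower()
--     text = f"{name} {description} {execution} {play_type}"
--
--     # Check for specific play types - order matters!
--     # Check RPO plays first (special category)
--     if play_type == "rpo" or any(word in text for word in ["rpo"]):
--         return "rpo"
--     # Check running plays
--     elif any(word in text for word in ["draw"]):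
--         return "draw_play"
--     elif any(word in text for word in ["sweep", "outside", "edge"]):
--         return "outside_run"
--     elif any(
--         word in text
--         for word in ["power", "dive", "inside", "zone", "trap", "counter"]
--     ):
--         return "inside_run"
--     # Check passing plays
--     elif any(word in text for word in ["screen", "bubble"]):
--         return "screen_pass"
--     elif any(word in text for word in ["te_", "tight_end"]) or name.startswith(
--         "te_"
--     ):
--         return "te_route"
--     elif any(
--         word in text for word in ["deep", "vert", "vertical", "go", "four_verts"]
--     ):
--         return "deep_pass"
--     elif any(
--         word in text for word in ["slant", "quick", "short", "hitch", "empty"]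
--     ):
--         return "short_pass"
--     elif any(word in text for word in ["pass", "throw", "route", "concept"]):
--         return "short_pass"  # Default passing
--     else:
--         return "inside_run"  # Default running
-- ===== SOURCE B (Python) =====
-- _KEYWORD_RANK = {
--     "rpo": 0,
--     "draw": 1,
--     "sweep": 2, "outside": 2, "edge": 2,
--     "power": 3, "dive": 3, "inside": 3, "zone": 3, "trap": 3, "counter": 3,
--     "screen": 4, "bubble": 4,
--     "te_": 5, "tight_end": 5,
--     "deep": 6, "vert": 6, "vertical": 6, "go": 6, "four_verts": 6,
--     "slant": 7, "quick": 7, "short": 7, "hitch": 7, "empty": 7,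
--     "pass": 7, "throw": 7, "route": 7, "concept": 7,
-- }
--
-- _CATEGORIES = ["rpo", "draw_play", "outside_run", "inside_run", "screen_pass",
--                "te_route", "deep_pass", "short_pass", "inside_run"]
--
--
-- def _determine_play_category(offense_data) -> str:
--     """Determine play category for outcome table lookup"""
--     text = " ".join(
--         offense_data.get(key, "").lower()
--         for key in ("name", "description", "execution_notes", "play_type")
--     )
--     rank = min((r for w, r in _KEYWORD_RANK.items() if w in text),
--                default=len(_CATEGORIES) - 1)
--     return _CATEGORIES[rank]
-- ===== Notes on version B (the rewrite author's own statement) =====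
-- stated objective: alternative
-- what changed: Replaced the ordered nine-branch first-match if/elif chain by a rank-minimisation: every keyword carries a numeric priority, B computes the minimum rank among all keywords occurring in the text in one min-reduction (no ordered scan, no early return) and indexes a category table by that rank; the redundant play_type=='rpo' and name.startswith('te_') clauses vanish because text already contains those fields.
import Mathlib
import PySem

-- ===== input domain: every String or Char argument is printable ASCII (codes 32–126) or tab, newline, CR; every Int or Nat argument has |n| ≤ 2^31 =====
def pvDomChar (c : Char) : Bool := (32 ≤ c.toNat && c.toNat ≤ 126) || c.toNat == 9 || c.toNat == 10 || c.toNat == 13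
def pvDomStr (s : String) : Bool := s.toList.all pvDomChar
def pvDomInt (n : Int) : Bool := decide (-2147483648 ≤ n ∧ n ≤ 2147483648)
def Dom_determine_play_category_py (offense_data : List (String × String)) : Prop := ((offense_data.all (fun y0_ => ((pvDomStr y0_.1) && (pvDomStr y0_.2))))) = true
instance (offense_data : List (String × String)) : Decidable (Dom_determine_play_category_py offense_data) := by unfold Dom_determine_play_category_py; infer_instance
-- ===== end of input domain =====

-- B replaces A's ordered nine-branch if/elif chain by rank minimisation: every keyword carries a
-- numeric priority rank, B takes the minimum rank among keywords occurring in the text in a single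
-- min-reduction and indexes a category table by it (alternative decomposition, same cost).

-- ===== PORT A =====
def determine_play_category_py (offense_data : List (String × String)) : String :=
  let d := PySem.Dict.mk offense_data
  let name := PySem.Str.lower (d.getD "name" "")
  let description := PySem.Str.lower (d.getD "description" "")
  let execution := PySem.Str.lower (d.getD "execution_notes" "")
  let play_type := PySem.Str.lower (d.getD "play_type" "")
  let text := name ++ " " ++ description ++ " " ++ execution ++ " " ++ play_type
  if play_type == "rpo" || ["rpo"].any (fun w => PySem.Str.isIn w text) then "rpo"
  else if ["draw"].any (fun w => PySem.Str.isIn w text) then "draw_play"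
  else if ["sweep", "outside", "edge"].any (fun w => PySem.Str.isIn w text) then "outside_run"
  else if ["power", "dive", "inside", "zone", "trap", "counter"].any (fun w => PySem.Str.isIn w text) then "inside_run"
  else if ["screen", "bubble"].any (fun w => PySem.Str.isIn w text) then "screen_pass"
  else if ["te_", "tight_end"].any (fun w => PySem.Str.isIn w text) || PySem.Str.startswith name "te_" then "te_route"
  else if ["deep", "vert", "vertical", "go", "four_verts"].any (fun w => PySem.Str.isIn w text) then "deep_pass"
  else if ["slant", "quick", "short", "hitch", "empty"].any (fun w => PySem.Str.isIn w text) then "short_pass"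
  else if ["pass", "throw", "route", "concept"].any (fun w => PySem.Str.isIn w text) then "short_pass"
  else "inside_run"

-- ===== PORT B =====
def dpcKeywordRank : List (String × Nat) :=
  [("rpo", 0),
   ("draw", 1),
   ("sweep", 2), ("outside", 2), ("edge", 2),
   ("power", 3), ("dive", 3), ("inside", 3), ("zone", 3), ("trap", 3), ("counter", 3),
   ("screen", 4), ("bubble", 4),
   ("te_", 5), ("tight_end", 5),
   ("deep", 6), ("vert", 6), ("vertical", 6), ("go", 6), ("four_verts", 6),
   ("slant", 7), ("quick", 7), ("short", 7), ("hitch", 7), ("empty", 7),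
   ("pass", 7), ("throw", 7), ("route", 7), ("concept", 7)]

def dpcCategories : List String :=
  ["rpo", "draw_play", "outside_run", "inside_run", "screen_pass",
   "te_route", "deep_pass", "short_pass", "inside_run"]

def determine_play_category_py_alt (offense_data : List (String × String)) : String :=
  let d := PySem.Dict.mk offense_data
  let text := PySem.Str.join " "
    [PySem.Str.lower (d.getD "name" ""), PySem.Str.lower (d.getD "description" ""),
     PySem.Str.lower (d.getD "execution_notes" ""), PySem.Str.lower (d.getD "play_type" "")]
  -- min((r for w, r in _KEYWORD_RANK.items() if w in text), default=len(_CATEGORIES)-1)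
  let rank := dpcKeywordRank.foldl
    (fun acc q => if PySem.Str.isIn q.1 text then min acc q.2 else acc)
    (dpcCategories.length - 1)
  dpcCategories.getD rank ""

-- ===== PRECONDITION & SPEC =====
def Spec_determine_play_category_py (offense_data : List (String × String)) (out : String) : Prop := out = determine_play_category_py_alt offense_data
instance (offense_data : List (String × String)) (out : String) : Decidable (Spec_determine_play_category_py offense_data out) := by unfold Spec_determine_play_category_py; infer_instance

-- ===== CLAIM (what is proved, stated in full; the proofs are below) =====
def Claim_equal_determine_play_category_py : Prop := ∀ (offense_data : List (String × String)), Dom_determine_play_category_py offense_data → Spec_determine_play_category_py offense_data (determine_play_category_py offense_data)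

-- ===== LEMMAS AND PROOFS =====

-- " ".join([a,b,c,d]) is the same string as a ++ " " ++ b ++ " " ++ c ++ " " ++ d
theorem dpc_join_four (a b c d : String) :
    PySem.Str.join " " [a, b, c, d] = a ++ " " ++ b ++ " " ++ c ++ " " ++ d := by
  apply String.ext
  simp [PySem.Str.join, PySem.Chars.join, List.intercalate, List.intersperse]

-- substring found in the right part of an append
theorem dpc_isIn_append_right (w s t : String) (h : PySem.Str.isIn w t = true) :
    PySem.Str.isIn w (s ++ t) = true := by
  rw [PySem.Str.isIn_iff_infix] at h ⊢
  simp only [String.toList_append]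
  exact h.trans (List.suffix_append _ _).isInfix

-- substring found in the left part of an append
theorem dpc_isIn_append_left (w s t : String) (h : PySem.Str.isIn w s = true) :
    PySem.Str.isIn w (s ++ t) = true := by
  rw [PySem.Str.isIn_iff_infix] at h ⊢
  simp only [String.toList_append]
  exact h.trans (List.prefix_append _ _).isInfix

theorem dpc_isIn_of_startswith (w s : String) (h : PySem.Str.startswith s w = true) :
    PySem.Str.isIn w s = true := by
  rw [PySem.Str.isIn_iff_infix]
  rw [PySem.Str.startswith_eq, PySem.Chars.startswith_iff] at h
  exact h.isInfix

-- play_type == "rpo" is subsumed by the substring check on text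
theorem dpc_rpo_subsumed (n d e p : String) (h : (p == "rpo") = true) :
    PySem.Str.isIn "rpo" (n ++ " " ++ d ++ " " ++ e ++ " " ++ p) = true := by
  apply dpc_isIn_append_right
  rw [beq_iff_eq] at h
  subst h
  decide

-- name.startswith("te_") is subsumed by the substring check on text
theorem dpc_te_subsumed (n d e p : String) (h : PySem.Str.startswith n "te_" = true) :
    PySem.Str.isIn "te_" (n ++ " " ++ d ++ " " ++ e ++ " " ++ p) = true := by
  have h1 := dpc_isIn_of_startswith _ _ h
  exact dpc_isIn_append_left _ _ _ (dpc_isIn_append_left _ _ _ (dpc_isIn_append_left _ _ _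
    (dpc_isIn_append_left _ _ _ (dpc_isIn_append_left _ _ _ (dpc_isIn_append_left _ _ _ h1)))))

-- A's first condition: play_type == "rpo" is redundant next to the substring test
theorem dpc_cond_rpo (n d e p : String) :
    (p == "rpo" || ["rpo"].any (fun w => PySem.Str.isIn w (n ++ " " ++ d ++ " " ++ e ++ " " ++ p)))
    = ["rpo"].any (fun w => PySem.Str.isIn w (n ++ " " ++ d ++ " " ++ e ++ " " ++ p)) := by
  cases hp : p == "rpo"
  · rw [Bool.false_or]
  · have h := dpc_rpo_subsumed n d e p hp
    simp only [List.any_cons, List.any_nil, h, Bool.or_false, Bool.true_or]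

-- A's te_route condition: name.startswith("te_") is redundant next to the substring test
theorem dpc_cond_te (n d e p : String) :
    ((["te_", "tight_end"].any (fun w => PySem.Str.isIn w (n ++ " " ++ d ++ " " ++ e ++ " " ++ p)))
      || PySem.Str.startswith n "te_")
    = ["te_", "tight_end"].any (fun w => PySem.Str.isIn w (n ++ " " ++ d ++ " " ++ e ++ " " ++ p)) := by
  cases hs : PySem.Str.startswith n "te_"
  · rw [Bool.or_false]
  · have h := dpc_te_subsumed n d e p hs
    simp only [List.any_cons, List.any_nil, h, Bool.or_false, Bool.true_or, Bool.or_true]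

-- folding min over a block of keywords that all carry the same rank
theorem dpc_fold_group (t : String) (r : Nat) (ws : List String) (acc : Nat) :
    (ws.map (fun w => (w, r))).foldl
      (fun a q => if PySem.Str.isIn q.1 t then min a q.2 else a) acc
    = if ws.any (fun w => PySem.Str.isIn w t) then min acc r else acc := by
  induction ws generalizing acc with
  | nil => simp
  | cons w ws ih =>
    simp only [List.map_cons, List.foldl_cons, List.any_cons]
    by_cases h : PySem.Str.isIn w t = true
    · simp only [h, Bool.true_or, if_true]
      rw [ih]
      split_ifs <;> omega
    · have h' : PySem.Str.isIn w t = false := eq_false_of_ne_true h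
      simp only [h', Bool.false_or, Bool.false_eq_true, if_false]
      exact ih acc

-- the flat keyword→rank list is the concatenation of its same-rank blocks
theorem dpc_split : dpcKeywordRank =
    ((["rpo"].map (fun w => (w, 0)))
      ++ (["draw"].map (fun w => (w, 1)))
      ++ (["sweep", "outside", "edge"].map (fun w => (w, 2)))
      ++ (["power", "dive", "inside", "zone", "trap", "counter"].map (fun w => (w, 3)))
      ++ (["screen", "bubble"].map (fun w => (w, 4)))
      ++ (["te_", "tight_end"].map (fun w => (w, 5)))
      ++ (["deep", "vert", "vertical", "go", "four_verts"].map (fun w => (w, 6)))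
      ++ (["slant", "quick", "short", "hitch", "empty",
           "pass", "throw", "route", "concept"].map (fun w => (w, 7)))) := rfl

-- the core: A's chain equals B's min-rank table lookup, for any four field strings
theorem dpc_core (n d e p : String) :
    (if p == "rpo" || ["rpo"].any (fun w => PySem.Str.isIn w (n ++ " " ++ d ++ " " ++ e ++ " " ++ p)) then "rpo"
     else if ["draw"].any (fun w => PySem.Str.isIn w (n ++ " " ++ d ++ " " ++ e ++ " " ++ p)) then "draw_play"
     else if ["sweep", "outside", "edge"].any (fun w => PySem.Str.isIn w (n ++ " " ++ d ++ " " ++ e ++ " " ++ p)) then "outside_run"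
     else if ["power", "dive", "inside", "zone", "trap", "counter"].any (fun w => PySem.Str.isIn w (n ++ " " ++ d ++ " " ++ e ++ " " ++ p)) then "inside_run"
     else if ["screen", "bubble"].any (fun w => PySem.Str.isIn w (n ++ " " ++ d ++ " " ++ e ++ " " ++ p)) then "screen_pass"
     else if ["te_", "tight_end"].any (fun w => PySem.Str.isIn w (n ++ " " ++ d ++ " " ++ e ++ " " ++ p)) || PySem.Str.startswith n "te_" then "te_route"
     else if ["deep", "vert", "vertical", "go", "four_verts"].any (fun w => PySem.Str.isIn w (n ++ " " ++ d ++ " " ++ e ++ " " ++ p)) then "deep_pass"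
     else if ["slant", "quick", "short", "hitch", "empty"].any (fun w => PySem.Str.isIn w (n ++ " " ++ d ++ " " ++ e ++ " " ++ p)) then "short_pass"
     else if ["pass", "throw", "route", "concept"].any (fun w => PySem.Str.isIn w (n ++ " " ++ d ++ " " ++ e ++ " " ++ p)) then "short_pass"
     else "inside_run")
    = dpcCategories.getD
        (dpcKeywordRank.foldl
          (fun acc q => if PySem.Str.isIn q.1 (n ++ " " ++ d ++ " " ++ e ++ " " ++ p) then min acc q.2 else acc)
          (dpcCategories.length - 1)) "" := by
  rw [dpc_cond_rpo, dpc_cond_te, dpc_split]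
  simp only [List.foldl_append, dpc_fold_group,
    show (["slant", "quick", "short", "hitch", "empty",
           "pass", "throw", "route", "concept"] : List String)
      = ["slant", "quick", "short", "hitch", "empty"] ++ ["pass", "throw", "route", "concept"]
      from rfl,
    List.any_append]
  generalize (["rpo"] : List String).any (fun w => PySem.Str.isIn w (n ++ " " ++ d ++ " " ++ e ++ " " ++ p)) = b0
  generalize (["draw"] : List String).any (fun w => PySem.Str.isIn w (n ++ " " ++ d ++ " " ++ e ++ " " ++ p)) = b1
  generalize (["sweep", "outside", "edge"] : List String).any (fun w => PySem.Str.isIn w (n ++ " " ++ d ++ " " ++ e ++ " " ++ p)) = b2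
  generalize (["power", "dive", "inside", "zone", "trap", "counter"] : List String).any (fun w => PySem.Str.isIn w (n ++ " " ++ d ++ " " ++ e ++ " " ++ p)) = b3
  generalize (["screen", "bubble"] : List String).any (fun w => PySem.Str.isIn w (n ++ " " ++ d ++ " " ++ e ++ " " ++ p)) = b4
  generalize (["te_", "tight_end"] : List String).any (fun w => PySem.Str.isIn w (n ++ " " ++ d ++ " " ++ e ++ " " ++ p)) = b5
  generalize (["deep", "vert", "vertical", "go", "four_verts"] : List String).any (fun w => PySem.Str.isIn w (n ++ " " ++ d ++ " " ++ e ++ " " ++ p)) = b6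
  generalize (["slant", "quick", "short", "hitch", "empty"] : List String).any (fun w => PySem.Str.isIn w (n ++ " " ++ d ++ " " ++ e ++ " " ++ p)) = b7
  generalize (["pass", "throw", "route", "concept"] : List String).any (fun w => PySem.Str.isIn w (n ++ " " ++ d ++ " " ++ e ++ " " ++ p)) = b8
  revert b0 b1 b2 b3 b4 b5 b6 b7 b8
  decide

-- ===== VERDICT (by name: the statement is the Claim_ definition above) =====
theorem determine_play_category_py_spec : Claim_equal_determine_play_category_py := by
  intro offense_data _
  unfold Spec_determine_play_category_py determine_play_category_py determine_play_category_py_alt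
  simp only [dpc_join_four]
  exact dpc_core _ _ _ _
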